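-- pv_equiv track=rewrite | github.com/sunnydog1028/smc-tl | smc-tl.py | translate_feature_name
-- ===== SOURCE A (Python) =====
-- FEATURE_TRANSLATIONS = {
--     'a1': 'Sex',
--     'a2': 'Age',
--     'a3': 'Weight',
--     'a4': 'BMI',
--     'b1': 'Chest Discomfort',
--     'b2': 'Dyspnea',                    # 呼吸困难
--     'b3': 'Palpitation',                # 心悸
--     'b4': 'Syncope',                    # 晕厥
--     'b5': 'Symptomatic',                # 有症状
--     'c1': 'NYHA Class II-IV',     # 心衰2级
--     'c2': 'Family History of SMCs',
--     # 家族史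
--     'c3': 'Hypertension',               # 高血压
--     'c4': 'Diabetes Mellitus',          # 糖尿病
--     'c5': 'Hyperlipidemia',             # 高脂血症
--     'c6': 'Coronary Artery Disease',    # 冠心病
--     'c7': 'Atrial Fibrillation/Flutter',# 房颤/房扑
--     'd1': 'VT/NSVT',                    # 室速/短阵室速
--     'd2': 'Left Bundle Branch Block',   # LBBB
--     'd3': 'Sinus Bradycardia',          # 窦缓
--     'd4': 'Intraventricular Block',     # 室内阻滞
--     'd5': 'AV Block',                   # 房室传导阻滞
--     'e1': 'Left Atrial Diameter',       # 左房前后径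
--     'e2': 'LVEDD',  # 左室横径
--     'e3': 'Max LV Wall Thickness',      # 左室最大室壁厚度
--     'e4': 'LV Ejection Fraction',       # 左室射血分数
--     'e5': 'LVEDV',                      # 左室舒张末期容积
--     'e6': 'LVESV',                      # 左室收缩末期容积
--     'e7': 'Cardiac Output',             # CO
--     'e8': 'Left Ventricular Mass',      # LVM
--     'e9': 'Ventricular Aneurysm',       # 有无室壁瘤
--     'e10': 'LVOT Obstruction',          # 有无左室流出道梗阻
--     'e11': 'SAM',                       # 有无SAM征
--     'e12': 'Late Gadolinium Enhancement', # 有无LGE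
--     'e13': 'RV Insertion Point Enhancement', # 右室插入点强化
--     'e14': 'Septal Enhancement',        # 室间隔强化
--     'e15': 'LV Free Wall Enhancement',  # 左室游离壁强化
--     'e16': 'Apical Enhancement',        # 心尖段强化
--     'f1': 'Surgical Treatment'          # 是否手术治疗
-- }
--
-- def translate_feature_name(feature_code, translation_dict=FEATURE_TRANSLATIONS):
--     """
--     翻译特征代码为英文变量名
--     支持处理编码后的分类变量名（如"a1_1"）
--     """
--     if not isinstance(feature_code, str):
--         feature_code = str(feature_code)
--
--     # 如果是经过编码的分类变量（如"a1_1"），提取原始特征名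
--     if '_' in feature_code:
--         # 尝试匹配编码后的变量名（如"a1_1", "a1_2"等）
--         for code in translation_dict.keys():
--             if feature_code.startswith(code + '_'):
--                 # 返回基础特征名加上编码部分
--                 base_name = translation_dict.get(code, code)
--                 category = feature_code.split('_')[1]
--                 # 尝试将类别转换为更有意义的形式
--                 try:
--                     # 如果类别是数字，可以添加描述
--                     if category.isdigit():
--                         if code == 'a1':  # 性别
--                             category_desc = 'Male' if category == '1' else 'Female'
--                         else:
--                             category_desc = f'Category {category}'
--                         return f"{base_name} ({category_desc})"
--                 except:
--                     pass
--                 return f"{base_name}_{category}"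
--
--         # 如果没有匹配到，提取基础特征名
--         base_feature = feature_code.split('_')[0]
--         base_name = translation_dict.get(base_feature, base_feature)
--         return f"{base_name}_{feature_code.split('_')[1]}"
--     else:
--         # 直接翻译
--         return translation_dict.get(feature_code, feature_code)
-- ===== SOURCE B (Python) =====
-- FEATURE_TRANSLATIONS = {
--     'a1': 'Sex', 'a2': 'Age', 'a3': 'Weight', 'a4': 'BMI',
--     'b1': 'Chest Discomfort', 'b2': 'Dyspnea', 'b3': 'Palpitation', 'b4': 'Syncope',
--     'b5': 'Symptomatic', 'c1': 'NYHA Class II-IV', 'c2': 'Family History of SMCs',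
--     'c3': 'Hypertension', 'c4': 'Diabetes Mellitus', 'c5': 'Hyperlipidemia',
--     'c6': 'Coronary Artery Disease', 'c7': 'Atrial Fibrillation/Flutter',
--     'd1': 'VT/NSVT', 'd2': 'Left Bundle Branch Block', 'd3': 'Sinus Bradycardia',
--     'd4': 'Intraventricular Block', 'd5': 'AV Block', 'e1': 'Left Atrial Diameter',
--     'e2': 'LVEDD', 'e3': 'Max LV Wall Thickness', 'e4': 'LV Ejection Fraction',
--     'e5': 'LVEDV', 'e6': 'LVESV', 'e7': 'Cardiac Output', 'e8': 'Left Ventricular Mass',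
--     'e9': 'Ventricular Aneurysm', 'e10': 'LVOT Obstruction', 'e11': 'SAM',
--     'e12': 'Late Gadolinium Enhancement', 'e13': 'RV Insertion Point Enhancement',
--     'e14': 'Septal Enhancement', 'e15': 'LV Free Wall Enhancement',
--     'e16': 'Apical Enhancement', 'f1': 'Surgical Treatment'
-- }
--
-- def translate_feature_name(feature_code, translation_dict=FEATURE_TRANSLATIONS):
--     """Translate a feature code (with optional category suffix) to its label.
--
--     Instead of scanning every dictionary key with startswith, walk the string's
--     underscore positions and probe the dictionary for each prefix directly.
--     """
--     if not isinstance(feature_code, str):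
--         feature_code = str(feature_code)
--     if '_' not in feature_code:
--         return translation_dict.get(feature_code, feature_code)
--     parts = feature_code.split('_')
--     head, category = parts[0], parts[1]
--     code = None
--     for i, ch in enumerate(feature_code):
--         if ch == '_' and feature_code[:i] in translation_dict:
--             code = feature_code[:i]
--             break
--     if code is None:
--         return f"{translation_dict.get(head, head)}_{category}"
--     base_name = translation_dict[code]
--     if category.isdigit():
--         if code == 'a1':
--             category_desc = 'Male' if category == '1' else 'Female'
--         else:
--             category_desc = f'Category {category}'
--         return f"{base_name} ({category_desc})"
--     return f"{base_name}_{category}"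
-- ===== Notes on version B (the rewrite author's own statement) =====
-- stated objective: alternative
-- what changed: A scans every dictionary key testing feature_code.startswith(key + '_'); B instead walks feature_code's character positions once and, at each underscore, probes the dictionary for the preceding prefix.
-- outside the precondition, e.g. on translate_feature_name('a_b_1', {'a_b': 'Y', 'a': 'X'}): A returns 'Y_b', B returns 'X_b'
import Mathlib
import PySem

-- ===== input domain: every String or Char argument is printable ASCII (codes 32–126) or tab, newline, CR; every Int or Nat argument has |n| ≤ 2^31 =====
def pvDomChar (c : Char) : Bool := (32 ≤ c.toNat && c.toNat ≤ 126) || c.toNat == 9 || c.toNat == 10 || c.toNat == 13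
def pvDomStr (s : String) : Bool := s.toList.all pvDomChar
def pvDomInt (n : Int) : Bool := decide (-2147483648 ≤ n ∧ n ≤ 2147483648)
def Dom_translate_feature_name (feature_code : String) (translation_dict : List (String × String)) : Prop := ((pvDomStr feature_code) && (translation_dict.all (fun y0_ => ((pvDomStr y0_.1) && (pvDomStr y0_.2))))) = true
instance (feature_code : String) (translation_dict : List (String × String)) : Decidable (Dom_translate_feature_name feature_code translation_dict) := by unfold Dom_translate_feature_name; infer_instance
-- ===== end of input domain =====

-- B replaces A's scan over every dictionary key (startswith test on each key) by a single walk
-- over the string's underscore positions, probing the dictionary once per prefix (objective: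
-- alternative decomposition, same result). translation_dict is a Python dict, modelled as
-- PySem.Dict.ofList of the pairs.

-- ===== PORT A =====
-- the body of A's key loop once a key matched: base name + formatted category


def tfnBodyA (fc : String) (d : PySem.Dict String String) (code : String) : String :=
  let base_name := d.getD code code
  let category := PySem.List.pyGetD ((PySem.Str.split? fc "_").getD []) 1 ""
  if PySem.Str.strIsdigit category then
    let category_desc :=
      if code == "a1" then (if category == "1" then "Male" else "Female")
      else "Category " ++ category
    base_name ++ " (" ++ category_desc ++ ")"
  else
    base_name ++ "_" ++ category

-- 'for code in translation_dict.keys(): if feature_code.startswith(code + "_"): return …'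
def tfnScanA (fc : String) (d : PySem.Dict String String) : List String → Option String
  | [] => none
  | code :: ks =>
    if PySem.Str.startswith fc (code ++ "_") then some (tfnBodyA fc d code)
    else tfnScanA fc d ks

def translate_feature_name (feature_code : String) (translation_dict : List (String × String)) : String :=
  let d := PySem.Dict.ofList translation_dict
  if PySem.Str.isIn "_" feature_code then
    match tfnScanA feature_code d d.keys with
    | some r => r
    | none =>
      let base_feature := PySem.List.pyGetD ((PySem.Str.split? feature_code "_").getD []) 0 ""
      let base_name := d.getD base_feature base_feature
      base_name ++ "_" ++ PySem.List.pyGetD ((PySem.Str.split? feature_code "_").getD []) 1 ""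
  else d.getD feature_code feature_code

-- ===== PORT B =====
-- B's formatting of a found code (the same f-strings as the Python)
def tfnFmtB (base_name code category : String) : String :=
  if PySem.Str.strIsdigit category then
    let category_desc :=
      if code == "a1" then (if category == "1" then "Male" else "Female")
      else "Category " ++ category
    base_name ++ " (" ++ category_desc ++ ")"
  else
    base_name ++ "_" ++ category

-- 'for i, ch in enumerate(feature_code): if ch == "_" and feature_code[:i] in translation_dict: …'
def tfnScanB (fc : String) (d : PySem.Dict String String) : List (Int × Char) → Option String
  | [] => none
  | (i, ch) :: rest =>
    if ch == '_' && d.contains (PySem.Str.slice fc none (some i)) then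
      some (PySem.Str.slice fc none (some i))
    else tfnScanB fc d rest

def translate_feature_name_alt (feature_code : String) (translation_dict : List (String × String)) : String :=
  let d := PySem.Dict.ofList translation_dict
  if PySem.Str.isIn "_" feature_code then
    let parts := (PySem.Str.split? feature_code "_").getD []
    let head := PySem.List.pyGetD parts 0 ""
    let category := PySem.List.pyGetD parts 1 ""
    match tfnScanB feature_code d (PySem.List.enumerate feature_code.toList) with
    | none => d.getD head head ++ "_" ++ category
    | some code => tfnFmtB ((d.get? code).getD "") code category
  else d.getD feature_code feature_code

-- ===== PRECONDITION & SPEC =====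
-- position i of feature_code is an underscore whose preceding prefix is a key of the dict
def tfnHit (feature_code : String) (translation_dict : List (String × String)) (i : Nat) : Bool :=
  (PySem.List.pyGet? feature_code.toList (i : Int) == some '_') &&
    (PySem.Dict.ofList translation_dict).contains (PySem.Str.slice feature_code none (some (i : Int)))

-- Pre_ excludes inputs where TWO distinct dict keys are both underscore-terminated prefixes of
-- feature_code: there A's first-in-dict-order key and B's shortest-prefix key may differ, and
-- both are defensible readings of an unspecified corner (first-vs-shortest match).
def Pre_translate_feature_name (feature_code : String) (translation_dict : List (String × String)) : Prop :=
  ((List.range feature_code.toList.length).filter (tfnHit feature_code translation_dict)).length ≤ 1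

instance (feature_code : String) (translation_dict : List (String × String)) : Decidable (Pre_translate_feature_name feature_code translation_dict) := by unfold Pre_translate_feature_name; infer_instance

def pvWitness_translate_feature_name : String × (List (String × String)) := ("a1_1", [("a1", "Sex")])

def Spec_translate_feature_name (feature_code : String) (translation_dict : List (String × String)) (out : String) : Prop := out = translate_feature_name_alt feature_code translation_dict
instance (feature_code : String) (translation_dict : List (String × String)) (out : String) : Decidable (Spec_translate_feature_name feature_code translation_dict out) := by unfold Spec_translate_feature_name; infer_instance

-- ===== CLAIM (what is proved, stated in full; the proofs are below) =====
def Claim_equal_translate_feature_name : Prop := ∀ (feature_code : String) (translation_dict : List (String × String)), Dom_translate_feature_name feature_code translation_dict → Pre_translate_feature_name feature_code translation_dict → Spec_translate_feature_name feature_code translation_dict (translate_feature_name feature_code translation_dict)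

-- ===== LEMMAS AND PROOFS =====

theorem slice_take (fc : String) (i : Nat) :
    (PySem.Str.slice fc none (some (i : Int))).toList = fc.toList.take i := by
  rw [PySem.Str.toList_slice, PySem.Chars.slice_eq_listSlice, PySem.List.slice_to _ (by positivity)]
  simp

-- A's key loop is find? over the keys, mapped through the loop body
theorem tfnScanA_eq_find (fc : String) (d : PySem.Dict String String) (ks : List String) :
    tfnScanA fc d ks =
      (ks.find? (fun k => PySem.Str.startswith fc (k ++ "_"))).map (tfnBodyA fc d) := by
  induction ks with
  | nil => rfl
  | cons k ks ih =>
    cases h : PySem.Chars.startswith fc.toList (k.toList ++ ['_']) <;>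
      simp [tfnScanA, List.find?, PySem.Str.startswith_eq, h, ih]

-- B's loop over enumerate returns the first hit position's prefix
theorem tfnScanB_eq_head (fc : String) (td : List (String × String)) (cs : List Char) (n : Nat)
    (hcs : cs = fc.toList.drop n) :
    tfnScanB fc (PySem.Dict.ofList td) (PySem.List.enumerate cs (n : Int)) =
      (((List.range' n cs.length).filter (tfnHit fc td)).head?).map
        (fun i => PySem.Str.slice fc none (some (i : Int))) := by
  induction cs generalizing n with
  | nil => simp [PySem.List.enumerate, tfnScanB]
  | cons c cs ih =>
    have hc : fc.toList[n]? = some c := by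
      have := List.getElem?_drop (xs := fc.toList) (i := n) (j := 0)
      rw [← hcs] at this; simpa using this.symm
    have hcs' : cs = fc.toList.drop (n+1) := by
      rw [← List.tail_drop, ← hcs]; rfl
    have hhit : tfnHit fc td n = (c == '_' && (PySem.Dict.ofList td).contains (PySem.Str.slice fc none (some (n : Int)))) := by
      simp [tfnHit, hc]
    rw [PySem.List.enumerate_cons]
    have hcast : (n : Int) + 1 = ((n+1 : Nat) : Int) := by push_cast; ring
    simp only [tfnScanB]
    rw [hcast, ih (n+1) hcs']
    simp only [List.length_cons, List.range'_succ, List.filter_cons, hhit]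
    by_cases h : (c == '_' && (PySem.Dict.ofList td).contains (PySem.Str.slice fc none (some (n : Int)))) = true
    · simp [h]
    · simp [h]

-- a key passes A's startswith test iff its length is a hit position naming it
theorem key_match_iff (fc : String) (td : List (String × String)) (k : String) :
    (k ∈ (PySem.Dict.ofList td).keys ∧ PySem.Str.startswith fc (k ++ "_") = true) ↔
      (k.toList.length < fc.toList.length ∧ tfnHit fc td k.toList.length = true ∧
        k = PySem.Str.slice fc none (some (k.toList.length : Int))) := by
  have hsw : PySem.Str.startswith fc (k ++ "_") = true ↔ (k.toList ++ ['_']) <+: fc.toList := by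
    rw [PySem.Str.startswith_eq, PySem.Chars.startswith_iff]
    simp
  constructor
  · rintro ⟨hk, hs⟩
    obtain ⟨t, ht⟩ := hsw.mp hs
    have hlen : k.toList.length < fc.toList.length := by
      rw [← ht]; simp
    have hget : fc.toList[k.toList.length]? = some '_' := by
      rw [← ht]
      rw [List.append_assoc]
      rw [List.getElem?_append_right (by omega)]
      simp
    have htake : fc.toList.take k.toList.length = k.toList := by
      rw [← ht, List.append_assoc, List.take_left]
    have hkeq : k = PySem.Str.slice fc none (some (k.toList.length : Int)) := by
      have h2 : (PySem.Str.slice fc none (some (k.toList.length : Int))).toList = k.toList := by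
        rw [slice_take, htake]
      calc k = String.ofList k.toList := String.ofList_toList.symm
        _ = String.ofList (PySem.Str.slice fc none (some (k.toList.length : Int))).toList := by rw [h2]
        _ = _ := String.ofList_toList
    refine ⟨hlen, ?_, hkeq⟩
    · unfold tfnHit
      rw [PySem.List.pyGet?_natCast, hget]
      simp only [beq_self_eq_true, Bool.true_and]
      rw [PySem.Dict.contains_iff_mem_keys]
      rw [← hkeq]; exact hk
  · rintro ⟨hlen, hhit, hkeq⟩
    unfold tfnHit at hhit
    rw [PySem.List.pyGet?_natCast] at hhit
    simp only [Bool.and_eq_true, beq_iff_eq] at hhit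
    obtain ⟨hget, hcont⟩ := hhit
    have htake : fc.toList.take k.toList.length = k.toList := by
      conv_rhs => rw [hkeq]
      rw [slice_take]
    constructor
    · rw [PySem.Dict.contains_iff_mem_keys] at hcont
      rw [hkeq]; exact hcont
    · rw [hsw]
      have : fc.toList.take (k.toList.length + 1) = k.toList ++ ['_'] := by
        rw [List.take_add_one, htake, hget]
        rfl
      rw [← this]
      exact List.take_prefix _ _

-- the two ports agree on every input with at most one hit position
theorem tfn_eq (fc : String) (td : List (String × String))
    (hpre : Pre_translate_feature_name fc td) :
    translate_feature_name fc td = translate_feature_name_alt fc td := by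
  unfold translate_feature_name translate_feature_name_alt
  by_cases hin : PySem.Str.isIn "_" fc = true
  · simp only [hin, if_true]
    have hB := tfnScanB_eq_head fc td fc.toList 0 (by simp)
    rw [tfnScanA_eq_find]
    unfold Pre_translate_feature_name at hpre
    rw [List.range_eq_range'] at hpre
    cases hf : List.find? (fun k => PySem.Str.startswith fc (k ++ "_")) (PySem.Dict.ofList td).keys with
    | none =>
      have hM : (List.range' 0 fc.toList.length).filter (tfnHit fc td) = [] := by
        rw [List.eq_nil_iff_forall_not_mem]
        intro i hi
        obtain ⟨hir, hhit⟩ := List.mem_filter.mp hi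
        have hilt : i < fc.toList.length := by
          have := List.mem_range'_1.mp hir; omega
        set key := PySem.Str.slice fc none (some (i : Int)) with hkey
        have hklen : key.toList.length = i := by
          rw [slice_take fc i, List.length_take]; omega
        have := (key_match_iff fc td key).mpr (by rw [hklen]; exact ⟨hilt, hhit, rfl⟩)
        rw [List.find?_eq_none] at hf
        exact hf key this.1 this.2
      rw [hM] at hB
      rw [Nat.cast_zero] at hB
      rw [hB]
      rfl
    | some k =>
      have hmem : k ∈ (PySem.Dict.ofList td).keys := List.mem_of_find?_eq_some hf
      have hP := List.find?_some hf
      simp only [] at hP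
      obtain ⟨hlen, hhit, hkeq⟩ := (key_match_iff fc td k).mp ⟨hmem, hP⟩
      set i := k.toList.length with hidef
      have hiM : i ∈ (List.range' 0 fc.toList.length).filter (tfnHit fc td) :=
        List.mem_filter.mpr ⟨List.mem_range'_1.mpr (by omega), hhit⟩
      have hMlen : ((List.range' 0 fc.toList.length).filter (tfnHit fc td)).length = 1 :=
        le_antisymm hpre (List.length_pos_of_mem hiM)
      obtain ⟨a, ha⟩ := List.length_eq_one_iff.mp hMlen
      have hai : i = a := by rw [ha] at hiM; simpa using hiM
      rw [ha, ← hai] at hB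
      rw [Nat.cast_zero] at hB
      have hB' : tfnScanB fc (PySem.Dict.ofList td) (PySem.List.enumerate fc.toList 0) =
          some (PySem.Str.slice fc none (some (i : Int))) := by rw [hB]; rfl
      rw [hB', ← hkeq]
      have hcont : (PySem.Dict.ofList td).contains k = true :=
        (PySem.Dict.contains_iff_mem_keys _ _).mpr hmem
      have hsome : ((PySem.Dict.ofList td).get? k).isSome = true := by
        rw [← PySem.Dict.contains_eq_isSome_get?]; exact hcont
      obtain ⟨v, hv⟩ := Option.isSome_iff_exists.mp hsome
      simp [tfnBodyA, tfnFmtB, PySem.Dict.getD_eq_get?_getD, hv]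
  · simp only [PySem.Str.isIn_eq, String.reduceToList] at hin
    simp [hin]

-- ===== VERDICT (by name: the statement is the Claim_ definition above) =====
theorem translate_feature_name_spec : Claim_equal_translate_feature_name := by
  intro feature_code translation_dict _hdom hpre
  unfold Spec_translate_feature_name
  exact tfn_eq feature_code translation_dict hpre
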